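-- pv_equiv track=rewrite | github.com/LEISHIQIANG/QuickLauncher | core/hotkey_conflict_checker.py | normalize_hotkey
-- ===== SOURCE A (Python) =====
-- def normalize_hotkey(hotkey_str: str) -> str:
--     """标准化快捷键字符串"""
--     parts = [p.strip().lower() for p in hotkey_str.replace("+", " ").split()]
--
--     # 排序修饰键
--     modifiers = []
--     key = ""
--
--     for part in parts:
--         if part in ["ctrl", "control"]:
--             modifiers.append("ctrl")
--         elif part in ["alt"]:
--             modifiers.append("alt")
--         elif part in ["shift"]:
--             modifiers.append("shift")
--         elif part in ["win", "windows", "super"]: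
--             modifiers.append("win")
--         else:
--             key = part
--
--     # 按固定顺序排列
--     order = {"ctrl": 0, "alt": 1, "shift": 2, "win": 3}
--     modifiers.sort(key=lambda x: order.get(x, 99))
--
--     result = "+".join(modifiers)
--     if key:
--         result = result + "+" + key if result else key
--
--     return result.title()
-- ===== SOURCE B (Python) =====
-- _ALIASES = {"ctrl": "ctrl", "control": "ctrl", "alt": "alt", "shift": "shift",
--             "win": "win", "windows": "win", "super": "win"}
-- _ORDER = ("ctrl", "alt", "shift", "win")
--
--
-- def normalize_hotkey(hotkey_str: str) -> str:
--     """标准化快捷键字符串"""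
--     counts = {m: 0 for m in _ORDER}
--     key = ""
--     for part in hotkey_str.replace("+", " ").split():
--         part = part.strip().lower()
--         mod = _ALIASES.get(part)
--         if mod is None:
--             key = part
--         else:
--             counts[mod] += 1
--     tokens = [m for m in _ORDER for _ in range(counts[m])]
--     if key:
--         tokens.append(key)
--     return "+".join(tokens).title()
-- ===== Notes on version B (the rewrite author's own statement) =====
-- stated objective: simpler
-- what changed: B classifies each token through an alias dict into per-modifier counters and emits the modifiers in the fixed order ctrl/alt/shift/win (preserving duplicate counts), replacing A's collect-then-stable-sort-by-priority-dict and its conditional string concatenation by one uniform join.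
import Mathlib
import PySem

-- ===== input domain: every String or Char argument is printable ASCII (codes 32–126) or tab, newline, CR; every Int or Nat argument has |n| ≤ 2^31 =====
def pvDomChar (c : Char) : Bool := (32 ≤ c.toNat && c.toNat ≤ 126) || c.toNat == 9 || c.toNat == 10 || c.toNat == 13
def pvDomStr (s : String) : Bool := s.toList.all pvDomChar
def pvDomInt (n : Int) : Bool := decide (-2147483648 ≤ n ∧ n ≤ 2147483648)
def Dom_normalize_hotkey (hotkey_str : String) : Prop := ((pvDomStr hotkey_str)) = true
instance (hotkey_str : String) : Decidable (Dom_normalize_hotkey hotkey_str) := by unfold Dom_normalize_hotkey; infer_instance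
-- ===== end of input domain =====

set_option maxRecDepth 8000
set_option maxHeartbeats 2000000

-- B replaces A's collect-then-sort of the modifiers by an alias-dict classification with per-modifier
-- counters and a fixed-order bucket emission (objective: simpler — no sort, one uniform join).

-- str.title(), ported by hand: exact on ASCII, where Python's cased characters are exactly the letters
def pvTitleChars : List Char → Bool → List Char
  | [], _ => []
  | c :: rest, prev =>
    if PySem.Chars.isalpha c then
      (if prev then PySem.Chars.lowerChar c else PySem.Chars.upperChar c) :: pvTitleChars rest true
    else c :: pvTitleChars rest false

def pvTitle (s : String) : String := String.ofList (pvTitleChars s.toList false)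

-- p.strip().lower()
def pvNorm (p : String) : String := PySem.Str.lower (PySem.Str.strip p)

-- ===== PORT A =====
def normalize_hotkey (hotkey_str : String) : String :=
  let parts := (PySem.Str.split₀ (PySem.Str.replace hotkey_str "+" " ")).map pvNorm
  let st := parts.foldl
    (fun (st : List String × String) part =>
      if part = "ctrl" ∨ part = "control" then (st.1 ++ ["ctrl"], st.2)
      else if part = "alt" then (st.1 ++ ["alt"], st.2)
      else if part = "shift" then (st.1 ++ ["shift"], st.2)
      else if part = "win" ∨ part = "windows" ∨ part = "super" then (st.1 ++ ["win"], st.2)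
      else (st.1, part))
    ([], "")
  let order : PySem.Dict String Int :=
    PySem.Dict.ofList [("ctrl", 0), ("alt", 1), ("shift", 2), ("win", 3)]
  let modifiers := PySem.List.sorted st.1 (fun x => order.getD x 99)
  let result := PySem.Str.join "+" modifiers
  let result := if st.2 ≠ "" then (if result ≠ "" then result ++ "+" ++ st.2 else st.2) else result
  pvTitle result

-- ===== PORT B =====
def pvAliases : PySem.Dict String String :=
  PySem.Dict.ofList [("ctrl", "ctrl"), ("control", "ctrl"), ("alt", "alt"), ("shift", "shift"),
                     ("win", "win"), ("windows", "win"), ("super", "win")]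

def pvModOrder : List String := ["ctrl", "alt", "shift", "win"]

def normalize_hotkey_alt (hotkey_str : String) : String :=
  let st := (PySem.Str.split₀ (PySem.Str.replace hotkey_str "+" " ")).foldl
    (fun (st : PySem.Dict String Int × String) part0 =>
      match pvAliases.get? (pvNorm part0) with
      | none => (st.1, pvNorm part0)
      | some m => (st.1.modify m 0 (· + 1), st.2))  -- counts[mod] += 1; the key m is always present
    (PySem.Dict.ofList [("ctrl", 0), ("alt", 0), ("shift", 0), ("win", 0)], "")
  let tokens := pvModOrder.flatMap (fun m => List.replicate (st.1.getD m 0).toNat m)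
  let tokens := if st.2 ≠ "" then tokens ++ [st.2] else tokens
  pvTitle (PySem.Str.join "+" tokens)

-- ===== PRECONDITION & SPEC =====
def Spec_normalize_hotkey (hotkey_str : String) (out : String) : Prop := out = normalize_hotkey_alt hotkey_str
instance (hotkey_str : String) (out : String) : Decidable (Spec_normalize_hotkey hotkey_str out) := by unfold Spec_normalize_hotkey; infer_instance

-- ===== CLAIM (what is proved, stated in full; the proofs are below) =====
def Claim_equal_normalize_hotkey : Prop := ∀ (hotkey_str : String), Dom_normalize_hotkey hotkey_str → Spec_normalize_hotkey hotkey_str (normalize_hotkey hotkey_str)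

-- ===== LEMMAS AND PROOFS =====

-- classification of one normalized token: the modifier it contributes, as a 0/1-element list
def pvClf (p : String) : List String :=
  if p = "ctrl" ∨ p = "control" then ["ctrl"]
  else if p = "alt" then ["alt"]
  else if p = "shift" then ["shift"]
  else if p = "win" ∨ p = "windows" ∨ p = "super" then ["win"]
  else []

def pvLastKey (ps : List String) (k : String) : String :=
  ps.foldl (fun k p => if pvClf p = [] then p else k) k

def pvKeyFn (x : String) : Int :=
  (PySem.Dict.ofList [("ctrl", (0 : Int)), ("alt", 1), ("shift", 2), ("win", 3)]).getD x 99

def pvBef (a b : String) : Bool := decide (pvKeyFn a < pvKeyFn b)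

def pvCanon (c a s w : Nat) : List String :=
  List.replicate c "ctrl" ++ List.replicate a "alt" ++ List.replicate s "shift" ++ List.replicate w "win"

def pvDict0 : PySem.Dict String Int := PySem.Dict.ofList [("ctrl", 0), ("alt", 0), ("shift", 0), ("win", 0)]

lemma pvClf_cases (p : String) : pvClf p = [] ∨ ∃ m, pvClf p = [m] := by
  unfold pvClf; split_ifs <;> simp

lemma pvClf_mem {x p : String} (h : x ∈ pvClf p) :
    x = "ctrl" ∨ x = "alt" ∨ x = "shift" ∨ x = "win" := by
  unfold pvClf at h; split_ifs at h <;> simp_all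

lemma pvAliases_get? (p : String) : pvAliases.get? p = (pvClf p).head? := by
  have h : pvAliases = PySem.Dict.mk [("ctrl", "ctrl"), ("control", "ctrl"), ("alt", "alt"),
      ("shift", "shift"), ("win", "win"), ("windows", "win"), ("super", "win")] := by decide
  rw [h]
  simp only [PySem.Dict.get?_mk_cons, pvClf, beq_iff_eq]
  by_cases h1 : p = "ctrl" <;> by_cases h2 : p = "control" <;> by_cases h3 : p = "alt" <;>
    by_cases h4 : p = "shift" <;> by_cases h5 : p = "win" <;> by_cases h6 : p = "windows" <;>
    by_cases h7 : p = "super" <;>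
    simp_all [eq_comm, PySem.Dict.get?]

-- A's loop, split into its two independent accumulators
lemma pvFoldA (ps : List String) :
    ps.foldl
      (fun (st : List String × String) part =>
        if part = "ctrl" ∨ part = "control" then (st.1 ++ ["ctrl"], st.2)
        else if part = "alt" then (st.1 ++ ["alt"], st.2)
        else if part = "shift" then (st.1 ++ ["shift"], st.2)
        else if part = "win" ∨ part = "windows" ∨ part = "super" then (st.1 ++ ["win"], st.2)
        else (st.1, part))
      ([], "")
    = (ps.flatMap pvClf, pvLastKey ps "") := by
  have hf : (fun (st : List String × String) part =>
        if part = "ctrl" ∨ part = "control" then (st.1 ++ ["ctrl"], st.2)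
        else if part = "alt" then (st.1 ++ ["alt"], st.2)
        else if part = "shift" then (st.1 ++ ["shift"], st.2)
        else if part = "win" ∨ part = "windows" ∨ part = "super" then (st.1 ++ ["win"], st.2)
        else (st.1, part))
      = (fun st p => (st.1 ++ pvClf p, if pvClf p = [] then p else st.2)) := by
    funext st p; simp only [pvClf]; split_ifs <;> simp_all
  rw [hf,
    PySem.List.foldl_prod_mk (f := fun m p => m ++ pvClf p)
      (g := fun k p => if pvClf p = [] then p else k),
    PySem.List.foldl_append_eq_flatMap]
  simp [pvLastKey]

-- B's loop: the counter dict is the counting fold over the classified tokens, the key is the same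
lemma pvFoldB (ps : List String) : ∀ (d : PySem.Dict String Int) (k : String),
    ps.foldl
      (fun (st : PySem.Dict String Int × String) part =>
        match pvAliases.get? part with
        | none => (st.1, part)
        | some m => (st.1.modify m 0 (· + 1), st.2))
      (d, k)
    = ((ps.flatMap pvClf).foldl (fun d x => d.modify x 0 (· + 1)) d, pvLastKey ps k) := by
  induction ps with
  | nil => intro d k; simp [pvLastKey]
  | cons p t ih =>
    intro d k
    rw [List.foldl_cons, pvAliases_get? p]
    rcases pvClf_cases p with h | ⟨m, h⟩
    · rw [h]
      dsimp only
      rw [ih]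
      simp [pvLastKey, h]
    · rw [h]
      dsimp only
      rw [ih]
      simp [pvLastKey, h]

lemma pvInsertBy_append_notlt (bef : String → String → Bool) (x : String)
    (pre suf : List String) (h : ∀ y ∈ pre, bef x y = false) :
    PySem.List.insertBy bef x (pre ++ suf) = pre ++ PySem.List.insertBy bef x suf := by
  induction pre with
  | nil => simp
  | cons a t ih => simp_all [PySem.List.insertBy]

lemma pvInsertBy_all_lt (bef : String → String → Bool) (x : String)
    (suf : List String) (h : ∀ y ∈ suf, bef x y = true) :
    PySem.List.insertBy bef x suf = x :: suf := by
  cases suf <;> simp_all [PySem.List.insertBy]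

lemma pvIns_canon (x : String) (hx : x = "ctrl" ∨ x = "alt" ∨ x = "shift" ∨ x = "win")
    (c a s w : Nat) :
    PySem.List.insertBy pvBef x (pvCanon c a s w) =
      if x = "ctrl" then pvCanon (c + 1) a s w
      else if x = "alt" then pvCanon c (a + 1) s w
      else if x = "shift" then pvCanon c a (s + 1) w
      else pvCanon c a s (w + 1) := by
  rcases hx with h | h | h | h <;> subst h
  · have h1 : ∀ y ∈ List.replicate c "ctrl", pvBef "ctrl" y = false := by
      intro y hy; rw [List.eq_of_mem_replicate hy]; decide
    have h2 : ∀ y ∈ List.replicate a "alt" ++ List.replicate s "shift" ++ List.replicate w "win",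
        pvBef "ctrl" y = true := by
      intro y hy
      rcases List.mem_append.1 hy with hy | hy
      · rcases List.mem_append.1 hy with hy | hy <;> rw [List.eq_of_mem_replicate hy] <;> decide
      · rw [List.eq_of_mem_replicate hy]; decide
    rw [show pvCanon c a s w = List.replicate c "ctrl" ++
        (List.replicate a "alt" ++ List.replicate s "shift" ++ List.replicate w "win") from by
      simp [pvCanon, List.append_assoc],
      pvInsertBy_append_notlt _ _ _ _ h1, pvInsertBy_all_lt _ _ _ h2]
    simp [pvCanon, List.replicate_succ', List.append_assoc]
  · have h1 : ∀ y ∈ List.replicate c "ctrl" ++ List.replicate a "alt", pvBef "alt" y = false := by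
      intro y hy
      rcases List.mem_append.1 hy with hy | hy <;> rw [List.eq_of_mem_replicate hy] <;> decide
    have h2 : ∀ y ∈ List.replicate s "shift" ++ List.replicate w "win", pvBef "alt" y = true := by
      intro y hy
      rcases List.mem_append.1 hy with hy | hy <;> rw [List.eq_of_mem_replicate hy] <;> decide
    rw [show pvCanon c a s w = (List.replicate c "ctrl" ++ List.replicate a "alt") ++
        (List.replicate s "shift" ++ List.replicate w "win") from by
      simp [pvCanon, List.append_assoc],
      pvInsertBy_append_notlt _ _ _ _ h1, pvInsertBy_all_lt _ _ _ h2]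
    simp [pvCanon, List.replicate_succ', List.append_assoc]
  · have h1 : ∀ y ∈ (List.replicate c "ctrl" ++ List.replicate a "alt") ++ List.replicate s "shift",
        pvBef "shift" y = false := by
      intro y hy
      rcases List.mem_append.1 hy with hy | hy
      · rcases List.mem_append.1 hy with hy | hy <;> rw [List.eq_of_mem_replicate hy] <;> decide
      · rw [List.eq_of_mem_replicate hy]; decide
    have h2 : ∀ y ∈ List.replicate w "win", pvBef "shift" y = true := by
      intro y hy; rw [List.eq_of_mem_replicate hy]; decide
    rw [show pvCanon c a s w = ((List.replicate c "ctrl" ++ List.replicate a "alt") ++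
        List.replicate s "shift") ++ List.replicate w "win" from by
      simp [pvCanon, List.append_assoc],
      pvInsertBy_append_notlt _ _ _ _ h1, pvInsertBy_all_lt _ _ _ h2]
    simp [pvCanon, List.replicate_succ', List.append_assoc]
  · have h1 : ∀ y ∈ ((List.replicate c "ctrl" ++ List.replicate a "alt") ++
        List.replicate s "shift") ++ List.replicate w "win", pvBef "win" y = false := by
      intro y hy
      rcases List.mem_append.1 hy with hy | hy
      · rcases List.mem_append.1 hy with hy | hy
        · rcases List.mem_append.1 hy with hy | hy <;> rw [List.eq_of_mem_replicate hy] <;> decide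
        · rw [List.eq_of_mem_replicate hy]; decide
      · rw [List.eq_of_mem_replicate hy]; decide
    have h2 : ∀ y ∈ ([] : List String), pvBef "win" y = true := by intro y hy; simp at hy
    rw [show pvCanon c a s w = (((List.replicate c "ctrl" ++ List.replicate a "alt") ++
        List.replicate s "shift") ++ List.replicate w "win") ++ [] from by
      simp [pvCanon, List.append_assoc],
      pvInsertBy_append_notlt _ _ _ _ h1, pvInsertBy_all_lt _ _ _ h2]
    simp [pvCanon, List.replicate_succ', List.append_assoc]

lemma pvSorted_aux (mods : List String)
    (h : ∀ x ∈ mods, x = "ctrl" ∨ x = "alt" ∨ x = "shift" ∨ x = "win") :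
    ∀ c a s w : Nat,
      mods.foldl (fun acc x => PySem.List.insertBy pvBef x acc) (pvCanon c a s w)
      = pvCanon (c + mods.count "ctrl") (a + mods.count "alt")
          (s + mods.count "shift") (w + mods.count "win") := by
  induction mods with
  | nil => intro c a s w; simp
  | cons x t ih =>
    intro c a s w
    have hx := h x (List.mem_cons_self ..)
    have ht : ∀ y ∈ t, y = "ctrl" ∨ y = "alt" ∨ y = "shift" ∨ y = "win" :=
      fun y hy => h y (List.mem_cons_of_mem _ hy)
    rw [List.foldl_cons, pvIns_canon x hx]
    rcases hx with hx | hx | hx | hx <;> subst hx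
    · rw [if_pos rfl, ih ht]
      simp [List.count_cons, Nat.add_comm, Nat.add_assoc, Nat.add_left_comm]
    · rw [if_neg (by decide), if_pos rfl, ih ht]
      simp [List.count_cons, Nat.add_comm, Nat.add_assoc, Nat.add_left_comm]
    · rw [if_neg (by decide), if_neg (by decide), if_pos rfl, ih ht]
      simp [List.count_cons, Nat.add_comm, Nat.add_assoc, Nat.add_left_comm]
    · rw [if_neg (by decide), if_neg (by decide), if_neg (by decide), ih ht]
      simp [List.count_cons, Nat.add_comm, Nat.add_assoc, Nat.add_left_comm]
  
lemma pvSorted_canon (mods : List String)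
    (h : ∀ x ∈ mods, x = "ctrl" ∨ x = "alt" ∨ x = "shift" ∨ x = "win") :
    PySem.List.sorted mods pvKeyFn
      = pvCanon (mods.count "ctrl") (mods.count "alt") (mods.count "shift") (mods.count "win") := by
  rw [PySem.List.sorted_eq_foldl_insertBy]
  have h0 : ([] : List String) = pvCanon 0 0 0 0 := by simp [pvCanon]
  rw [show (fun a b => decide (pvKeyFn a < pvKeyFn b)) = pvBef from rfl, h0, pvSorted_aux mods h]
  simp

lemma pvJoinChars_append (sep : List Char) (l : List (List Char)) (hne : l ≠ []) (k : List Char) :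
    PySem.Chars.join sep (l ++ [k]) = PySem.Chars.join sep l ++ sep ++ k := by
  induction l with
  | nil => simp at hne
  | cons a t ih =>
    cases t with
    | nil => simp [PySem.Chars.join_cons_cons, PySem.Chars.join_singleton]
    | cons b t' =>
      have h1 : (a :: b :: t') ++ [k] = a :: (b :: (t' ++ [k])) := by simp
      rw [h1, PySem.Chars.join_cons_cons,
        show b :: (t' ++ [k]) = (b :: t') ++ [k] from rfl, ih (by simp),
        PySem.Chars.join_cons_cons]
      simp [List.append_assoc]

lemma pvJoin_ne_nil (sep : List Char) (x : List Char) (rest : List (List Char)) (hx : x ≠ []) :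
    PySem.Chars.join sep (x :: rest) ≠ [] := by
  cases rest with
  | nil => simpa [PySem.Chars.join_singleton] using hx
  | cons b t => rw [PySem.Chars.join_cons_cons]; simp [hx]

lemma pvStr_eq_of_toList {s t : String} (h : s.toList = t.toList) : s = t := by
  rw [← String.ofList_toList (s := s), ← String.ofList_toList (s := t), h]

lemma pvFinal_join (mods : List String)
    (hm : ∀ x ∈ mods, x = "ctrl" ∨ x = "alt" ∨ x = "shift" ∨ x = "win") (key : String) :
    (if key ≠ "" then
      (if PySem.Str.join "+" mods ≠ "" then PySem.Str.join "+" mods ++ "+" ++ key else key)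
     else PySem.Str.join "+" mods)
    = PySem.Str.join "+" (if key ≠ "" then mods ++ [key] else mods) := by
  by_cases hk : key = ""
  · simp [hk]
  · simp only [hk, ne_eq, not_false_iff, if_true]
    cases mods with
    | nil =>
      have hjoin : PySem.Str.join "+" ([] : List String) = "" := by decide
      simp only [hjoin]
      apply pvStr_eq_of_toList
      simp [PySem.Str.join, PySem.Chars.join_singleton]
    | cons m t =>
      have hmne : m.toList ≠ [] := by
        rcases hm m (List.mem_cons_self ..) with h | h | h | h <;> subst h <;> decide
      have hne : PySem.Chars.join "+".toList ((m :: t).map String.toList) ≠ [] := by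
        rw [List.map_cons]; exact pvJoin_ne_nil _ _ _ hmne
      have hjoin_ne : PySem.Str.join "+" (m :: t) ≠ "" := by
        intro hcontra
        apply hne
        have := congrArg String.toList hcontra
        simpa [PySem.Str.join] using this
      simp only [hjoin_ne, ne_eq, not_false_iff, if_true]
      apply pvStr_eq_of_toList
      simp only [PySem.Str.join, String.toList_ofList, String.toList_append, List.map_append,
        List.map_cons, List.map_nil]
      rw [pvJoinChars_append _ _ (by simp) _]

-- ===== VERDICT (by name: the statement is the Claim_ definition above) =====
theorem normalize_hotkey_spec : Claim_equal_normalize_hotkey := by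
  intro s _
  show normalize_hotkey s = normalize_hotkey_alt s
  have hA : normalize_hotkey s = (let parts := (PySem.Str.split₀ (PySem.Str.replace s "+" " ")).map pvNorm
    let st := parts.foldl
      (fun (st : List String × String) part =>
        if part = "ctrl" ∨ part = "control" then (st.1 ++ ["ctrl"], st.2)
        else if part = "alt" then (st.1 ++ ["alt"], st.2)
        else if part = "shift" then (st.1 ++ ["shift"], st.2)
        else if part = "win" ∨ part = "windows" ∨ part = "super" then (st.1 ++ ["win"], st.2)
        else (st.1, part))
      ([], "")
    let order : PySem.Dict String Int :=
      PySem.Dict.ofList [("ctrl", 0), ("alt", 1), ("shift", 2), ("win", 3)]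
    let modifiers := PySem.List.sorted st.1 (fun x => order.getD x 99)
    let result := PySem.Str.join "+" modifiers
    let result := if st.2 ≠ "" then (if result ≠ "" then result ++ "+" ++ st.2 else st.2) else result
    pvTitle result) := rfl
  have hB : normalize_hotkey_alt s = (
      let st := (PySem.Str.split₀ (PySem.Str.replace s "+" " ")).foldl
        (fun (st : PySem.Dict String Int × String) part0 =>
          match pvAliases.get? (pvNorm part0) with
          | none => (st.1, pvNorm part0)
          | some m => (st.1.modify m 0 (· + 1), st.2))
        (PySem.Dict.ofList [("ctrl", 0), ("alt", 0), ("shift", 0), ("win", 0)], "")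
      let tokens := pvModOrder.flatMap (fun m => List.replicate (st.1.getD m 0).toNat m)
      let tokens := if st.2 ≠ "" then tokens ++ [st.2] else tokens
      pvTitle (PySem.Str.join "+" tokens)) := rfl
  rw [hA, hB]
  dsimp only
  set ps := (PySem.Str.split₀ (PySem.Str.replace s "+" " ")).map pvNorm with hps
  rw [show (PySem.Str.split₀ (PySem.Str.replace s "+" " ")).foldl
      (fun (st : PySem.Dict String Int × String) part0 =>
        match pvAliases.get? (pvNorm part0) with
        | none => (st.1, pvNorm part0)
        | some m => (st.1.modify m 0 (· + 1), st.2))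
      (PySem.Dict.ofList [("ctrl", 0), ("alt", 0), ("shift", 0), ("win", 0)], "")
    = ps.foldl
      (fun (st : PySem.Dict String Int × String) part =>
        match pvAliases.get? part with
        | none => (st.1, part)
        | some m => (st.1.modify m 0 (· + 1), st.2))
      (pvDict0, "") from by rw [hps, List.foldl_map]; rfl]
  rw [pvFoldA ps, pvFoldB ps]
  dsimp only
  set mods := ps.flatMap pvClf with hmods
  have hmem : ∀ x ∈ mods, x = "ctrl" ∨ x = "alt" ∨ x = "shift" ∨ x = "win" := by
    intro x hx
    rw [hmods] at hx
    rcases List.mem_flatMap.1 hx with ⟨p, _, hp⟩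
    exact pvClf_mem hp
  have hcounts : ∀ m : String,
      ((mods.foldl (fun d x => d.modify x 0 (· + 1)) pvDict0).getD m 0)
        = pvDict0.getD m 0 + (mods.count m : Int) :=
    fun m => PySem.Dict.getD_foldl_modify_add_one mods pvDict0 m
  have htokens : pvModOrder.flatMap
      (fun m => List.replicate ((mods.foldl (fun d x => d.modify x 0 (· + 1)) pvDict0).getD m 0).toNat m)
      = pvCanon (mods.count "ctrl") (mods.count "alt") (mods.count "shift") (mods.count "win") := by
    simp only [pvModOrder, List.flatMap_cons, List.flatMap_nil, List.append_nil, hcounts]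
    have d1 : pvDict0.getD "ctrl" 0 = 0 := by decide
    have d2 : pvDict0.getD "alt" 0 = 0 := by decide
    have d3 : pvDict0.getD "shift" 0 = 0 := by decide
    have d4 : pvDict0.getD "win" 0 = 0 := by decide
    rw [d1, d2, d3, d4]
    simp only [zero_add, Int.toNat_natCast, pvCanon, List.append_assoc]
  rw [htokens]
  have hkeyfn : (fun x => (PySem.Dict.ofList
      [("ctrl", (0 : Int)), ("alt", 1), ("shift", 2), ("win", 3)]).getD x 99) = pvKeyFn := rfl
  rw [hkeyfn, pvSorted_canon mods hmem]
  set cc := mods.count "ctrl"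
  set ca := mods.count "alt"
  set cs := mods.count "shift"
  set cw := mods.count "win"
  have hcmem : ∀ x ∈ pvCanon cc ca cs cw, x = "ctrl" ∨ x = "alt" ∨ x = "shift" ∨ x = "win" := by
    intro x hx
    simp only [pvCanon, List.mem_append] at hx
    rcases hx with ((hx | hx) | hx) | hx <;>
      rw [List.eq_of_mem_replicate hx] <;> simp
  rw [pvFinal_join (pvCanon cc ca cs cw) hcmem (pvLastKey ps "")]
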